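-- pv_equiv track=rewrite | github.com/kunalb/AoC25 | day02/day02.py | solve_range
-- ===== SOURCE A (Python) =====
-- def solve_range(start, stop):
--     sum = 0
--     sum2 = 0
--
--     for num in range(start, stop + 1):
--         strnum = str(num)
--         l = len(strnum)
--
--         checked = set()
--         for sz in range(l // 2, 0, -1):
--             if l % sz != 0:
--                 continue
--
--             for c in checked:
--                 if c % sz == 0:
--                     continue
--
--             checked.add(sz)
--
--             matched = True
--             for i in range(sz, l, sz):
--                 matched = strnum[i:i+sz] == strnum[0:sz]
--                 if not matched:
--                     break
--             if matched:
--                 sum2 += num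
--                 break
--
--         if l & 1 != 0:
--             continue
--         if strnum[0:l//2] == strnum[l//2:]:
--             sum += num
--
--     return sum, sum2
-- ===== SOURCE B (Python) =====
-- def solve_range(start, stop):
--     # Generative: every "doubled-half" / "periodic" number is b * R where R is the
--     # repdigit multiplier (10**L - 1) // (10**d - 1) for a proper divisor d of the
--     # digit count L and b is the d-digit block; enumerate those directly instead of
--     # testing every number in the range.
--     half, per = set(), set()
--     max_len = len(str(stop)) if stop > 0 else 0
--     for L in range(2, max_len + 1):
--         for d in range(1, L // 2 + 1):
--             if L % d == 0:
--                 rep = (10 ** L - 1) // (10 ** d - 1)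
--                 for b in range(10 ** (d - 1), 10 ** d):
--                     num = b * rep
--                     if start <= num <= stop:
--                         per.add(num)
--                         if 2 * d == L:
--                             half.add(num)
--     return sum(half), sum(per)
-- ===== Notes on version B (the rewrite author's own statement) =====
-- stated objective: alternative
-- what changed: A scans every number in the range and tests its digit string for periodicity/doubled halves; B never tests numbers at all: it generates every qualifying number directly as block*((10**L-1)//(10**d-1)) from the digit-length L, a proper divisor d of L and the d-digit block, collects them in sets and sums those in range (work depends on stop's magnitude, not on the range width).
import Mathlib
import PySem

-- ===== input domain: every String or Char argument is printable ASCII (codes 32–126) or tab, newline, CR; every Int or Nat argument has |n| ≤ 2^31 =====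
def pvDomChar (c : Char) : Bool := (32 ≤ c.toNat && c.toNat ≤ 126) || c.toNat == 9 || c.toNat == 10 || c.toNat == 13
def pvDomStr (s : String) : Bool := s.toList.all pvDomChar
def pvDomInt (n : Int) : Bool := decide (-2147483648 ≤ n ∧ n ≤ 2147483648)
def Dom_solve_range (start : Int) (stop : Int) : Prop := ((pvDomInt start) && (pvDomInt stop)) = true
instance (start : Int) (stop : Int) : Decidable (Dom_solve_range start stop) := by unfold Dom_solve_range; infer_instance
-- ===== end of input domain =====

-- B replaces A's per-number digit-string scan by direct generation: every qualifying
-- number is block * ((10^L-1)/(10^d-1)) for a proper divisor d of its digit count L,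
-- so B enumerates blocks instead of testing the range; objective: alternative.


-- ===== PORT A =====
-- the 'matched' loop: for i in range(sz, l, sz): matched = (strnum[i:i+sz] == strnum[0:sz]); break on mismatch
def pvMatchLoop (s : List Char) (sz : Int) : List Int → Bool
  | [] => true
  | i :: rest =>
    if PySem.List.slice s (some i) (some (i + sz)) = PySem.List.slice s (some 0) (some sz) then
      pvMatchLoop s sz rest
    else false

-- the sz loop over range(l//2, 0, -1), threading the 'checked' set, with break after a match.
-- A's 'for c in checked: if c % sz == 0: continue' has no effect (continue only ends that
-- inner iteration, whose body does nothing else), so only 'checked.add(sz)' is kept.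
def pvSzLoop (s : List Char) (l : Int) : List Int → PySem.Set Int → Bool
  | [], _ => false
  | sz :: rest, checked =>
    if PySem.Int.mod l sz ≠ 0 then pvSzLoop s l rest checked
    else
      let checked' := PySem.Set.add checked sz
      if pvMatchLoop s sz (PySem.List.pyRange sz l sz) then true
      else pvSzLoop s l rest checked'

def solve_range (start : Int) (stop : Int) : Int × Int :=
  (PySem.List.pyRange start (stop + 1) 1).foldl
    (fun acc num =>
      let strnum := PySem.Int.toChars num
      let l : Int := strnum.length
      let sum2 := if pvSzLoop strnum l (PySem.List.pyRange (PySem.Int.floordiv l 2) 0 (-1)) PySem.Set.empty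
                  then acc.2 + num else acc.2
      -- 'l & 1 != 0': since l = len(strnum) ≥ 0, l & 1 is exactly l % 2 (exact here)
      if PySem.Int.mod l 2 ≠ 0 then (acc.1, sum2)
      else if PySem.List.slice strnum (some 0) (some (PySem.Int.floordiv l 2))
              = PySem.List.slice strnum (some (PySem.Int.floordiv l 2)) none
      then (acc.1 + num, sum2) else (acc.1, sum2))
    (0, 0)

-- ===== PORT B =====
-- Source B: generate num = b * ((10**L - 1) // (10**d - 1)) for 2 <= L <= len(str(stop)),
-- proper divisors d of L, d-digit blocks b; collect into the two sets, then sum them.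
-- (10 ** e is ported as (10:Int) ^ e.toNat — exact, the exponents here are >= 0.)
def solve_range_alt (start : Int) (stop : Int) : Int × Int :=
  let maxLen : Int := if 0 < stop then ((PySem.Int.toChars stop).length : Int) else 0
  let st :=
    (PySem.List.pyRange 2 (maxLen + 1) 1).foldl (fun st L =>
      (PySem.List.pyRange 1 (PySem.Int.floordiv L 2 + 1) 1).foldl (fun st d =>
        if PySem.Int.mod L d = 0 then
          let rep : Int := PySem.Int.floordiv (10 ^ L.toNat - 1) (10 ^ d.toNat - 1)
          (PySem.List.pyRange (10 ^ (d.toNat - 1)) (10 ^ d.toNat) 1).foldl (fun st b =>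
            let num := b * rep
            if start ≤ num ∧ num ≤ stop then
              (if 2 * d = L then PySem.Set.add st.1 num else st.1, PySem.Set.add st.2 num)
            else st) st
        else st) st)
      ((PySem.Set.empty : PySem.Set Int), (PySem.Set.empty : PySem.Set Int))
  (st.1.sum, st.2.sum)

-- ===== PRECONDITION & SPEC =====
def Spec_solve_range (start : Int) (stop : Int) (out : Int × Int) : Prop := out = solve_range_alt start stop
instance (start : Int) (stop : Int) (out : Int × Int) : Decidable (Spec_solve_range start stop out) := by unfold Spec_solve_range; infer_instance

-- ===== CLAIM (what is proved, stated in full; the proofs are below) =====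
def Claim_equal_solve_range : Prop := ∀ (start : Int) (stop : Int), Dom_solve_range start stop → Spec_solve_range start stop (solve_range start stop)

-- ===== LEMMAS AND PROOFS =====


-- canonical decimal digit string of a Nat (what Nat.toDigits 10 computes)
def decChars (n : Nat) : List Char :=
  if _h : n < 10 then [Nat.digitChar n]
  else decChars (n / 10) ++ [Nat.digitChar (n % 10)]
decreasing_by exact Nat.div_lt_self (by omega) (by omega)

lemma decChars_lt {n : Nat} (h : n < 10) : decChars n = [Nat.digitChar n] := by
  rw [decChars, dif_pos h]

lemma decChars_ge {n : Nat} (h : 10 ≤ n) :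
    decChars n = decChars (n / 10) ++ [Nat.digitChar (n % 10)] := by
  rw [decChars, dif_neg (by omega)]

lemma toDigitsCore_eq : ∀ (f n : Nat) (acc : List Char), n < f →
    Nat.toDigitsCore 10 f n acc = decChars n ++ acc := by
  intro f
  induction f with
  | zero => intro n acc h; omega
  | succ f ih =>
    intro n acc h
    by_cases hn : n < 10
    · have h0 : n / 10 = 0 := Nat.div_eq_of_lt hn
      simp [Nat.toDigitsCore, h0, decChars_lt hn, Nat.mod_eq_of_lt hn]
    · have h0 : n / 10 ≠ 0 := by
        intro hc; omega
      have hdl : n / 10 < n := Nat.div_lt_self (by omega) (by omega)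
      have hstep : Nat.toDigitsCore 10 (f + 1) n acc
          = Nat.toDigitsCore 10 f (n / 10) (Nat.digitChar (n % 10) :: acc) := by
        rw [Nat.toDigitsCore]
        simp only [h0, if_false]
      rw [hstep, ih (n / 10) _ (by omega), decChars_ge (n := n) (by omega), List.append_assoc]
      rfl

lemma toChars_of_nonneg {num : Int} (h : 0 ≤ num) :
    PySem.Int.toChars num = decChars num.toNat := by
  unfold PySem.Int.toChars
  rw [if_neg (by omega)]
  unfold Nat.toDigits
  rw [toDigitsCore_eq _ _ _ (by omega), List.append_nil]

lemma toChars_of_neg {num : Int} (h : num < 0) :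
    PySem.Int.toChars num = '-' :: decChars num.natAbs := by
  unfold PySem.Int.toChars
  rw [if_pos h]
  unfold Nat.toDigits
  rw [toDigitsCore_eq _ _ _ (by omega), List.append_nil]

def valC (t : List Char) : Nat := t.foldl (fun a c => 10 * a + (c.toNat - 48)) 0

lemma valC_foldl (t : List Char) : ∀ a : Nat,
    t.foldl (fun a c => 10 * a + (c.toNat - 48)) a = a * 10 ^ t.length + valC t := by
  induction t with
  | nil => intro a; simp [valC]
  | cons c t ih =>
    intro a
    show t.foldl _ (10 * a + (c.toNat - 48)) = _
    rw [ih (10 * a + (c.toNat - 48))]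
    show _ = a * 10 ^ (t.length + 1) + valC (c :: t)
    have : valC (c :: t) = t.foldl (fun a c => 10 * a + (c.toNat - 48)) (10 * 0 + (c.toNat - 48)) := rfl
    rw [this, ih (10 * 0 + (c.toNat - 48))]
    ring

lemma valC_append (s t : List Char) : valC (s ++ t) = valC s * 10 ^ t.length + valC t := by
  unfold valC
  rw [List.foldl_append]
  exact valC_foldl t _

lemma digitChar_toNat {e : Nat} (h : e < 10) : (Nat.digitChar e).toNat = 48 + e := by
  interval_cases e <;> decide

lemma valC_decChars (n : Nat) : valC (decChars n) = n := by
  induction n using Nat.strong_induction_on with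
  | _ n ih =>
    by_cases h : n < 10
    · rw [decChars_lt h]
      show 10 * 0 + ((Nat.digitChar n).toNat - 48) = n
      rw [digitChar_toNat h]; omega
    · rw [decChars_ge (by omega), valC_append, ih (n / 10) (Nat.div_lt_self (by omega) (by omega))]
      show n / 10 * 10 ^ 1 + valC [Nat.digitChar (n % 10)] = n
      have : valC [Nat.digitChar (n % 10)] = 10 * 0 + ((Nat.digitChar (n % 10)).toNat - 48) := rfl
      rw [this, digitChar_toNat (Nat.mod_lt _ (by omega))]
      omega

lemma decChars_ne_nil (n : Nat) : decChars n ≠ [] := by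
  by_cases h : n < 10
  · rw [decChars_lt h]; simp
  · rw [decChars_ge (by omega)]; simp

lemma decChars_len_pos (n : Nat) : 1 ≤ (decChars n).length :=
  List.length_pos_of_ne_nil (decChars_ne_nil n)

lemma decChars_bounds {n : Nat} (h : 1 ≤ n) :
    10 ^ ((decChars n).length - 1) ≤ n ∧ n < 10 ^ (decChars n).length := by
  induction n using Nat.strong_induction_on with
  | _ n ih =>
    by_cases hn : n < 10
    · rw [decChars_lt hn]; simpa using ⟨h, hn⟩
    · rw [decChars_ge (by omega)]
      have h1 : 1 ≤ n / 10 := by omega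
      obtain ⟨ihl, ihu⟩ := ih (n / 10) (Nat.div_lt_self (by omega) (by omega)) h1
      have hlen : (decChars (n / 10) ++ [Nat.digitChar (n % 10)]).length
          = (decChars (n / 10)).length + 1 := by
        rw [List.length_append, List.length_singleton]
      rw [hlen]
      set l := (decChars (n / 10)).length with hl
      have hlp : 1 ≤ l := decChars_len_pos _
      have e1 : 10 ^ (l + 1 - 1) = 10 ^ (l - 1) * 10 := by
        rw [← Nat.pow_succ]; congr 1; omega
      have e2 : 10 ^ (l + 1) = 10 ^ l * 10 := by rw [← Nat.pow_succ]
      constructor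
      · rw [e1]
        calc 10 ^ (l - 1) * 10 ≤ n / 10 * 10 := by exact Nat.mul_le_mul_right _ ihl
        _ ≤ n := Nat.div_mul_le_self n 10
      · rw [e2]
        have : n < (n / 10 + 1) * 10 := by omega
        calc n < (n / 10 + 1) * 10 := this
        _ ≤ 10 ^ l * 10 := Nat.mul_le_mul_right _ (by omega)

lemma decChars_len_eq_iff {n L : Nat} (hn : 1 ≤ n) (hL : 1 ≤ L) :
    (decChars n).length = L ↔ 10 ^ (L - 1) ≤ n ∧ n < 10 ^ L := by
  obtain ⟨hb1, hb2⟩ := decChars_bounds hn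
  set l := (decChars n).length with hl
  have hlp : 1 ≤ l := decChars_len_pos _
  constructor
  · rintro rfl; exact ⟨hb1, hb2⟩
  · rintro ⟨hc1, hc2⟩
    have h1 : 10 ^ (l - 1) < 10 ^ L := lt_of_le_of_lt hb1 hc2
    have h2 : 10 ^ (L - 1) < 10 ^ l := lt_of_le_of_lt hc1 hb2
    rw [Nat.pow_lt_pow_iff_right (by norm_num)] at h1 h2
    omega

lemma decChars_digits {n : Nat} : ∀ c ∈ decChars n, 48 ≤ c.toNat ∧ c.toNat ≤ 57 := by
  induction n using Nat.strong_induction_on with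
  | _ n ih =>
    by_cases hn : n < 10
    · rw [decChars_lt hn]
      intro c hc
      simp at hc
      subst hc
      rw [digitChar_toNat hn]; omega
    · rw [decChars_ge (by omega)]
      intro c hc
      rw [List.mem_append] at hc
      rcases hc with hc | hc
      · exact ih (n / 10) (Nat.div_lt_self (by omega) (by omega)) c hc
      · simp at hc
        subst hc
        rw [digitChar_toNat (Nat.mod_lt _ (by omega))]
        omega

lemma decChars_head_ne_zero {n : Nat} (hn : 1 ≤ n) :
    ∀ c, (decChars n).head? = some c → c ≠ '0' := by
  induction n using Nat.strong_induction_on with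
  | _ n ih =>
    by_cases h : n < 10
    · rw [decChars_lt h]
      intro c hc
      simp at hc
      subst hc
      interval_cases n <;> decide
    · rw [decChars_ge (by omega)]
      intro c hc
      rw [List.head?_append_of_ne_nil _ (decChars_ne_nil _)] at hc
      exact ih (n / 10) (Nat.div_lt_self (by omega) (by omega)) (by omega) c hc

lemma char_eq_of_toNat {a b : Char} (h : a.toNat = b.toNat) : a = b := by
  apply Char.ext
  exact UInt32.toNat_inj.mp h

lemma decChars_valC : ∀ (t : List Char), t ≠ [] →
    (∀ c ∈ t, 48 ≤ c.toNat ∧ c.toNat ≤ 57) →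
    (∀ c, t.head? = some c → c ≠ '0') →
    decChars (valC t) = t := by
  intro t
  induction t using List.reverseRecOn with
  | nil => intro h; exact absurd rfl h
  | append_singleton t c ih =>
    intro _ hdig hhd
    by_cases htnil : t = []
    · subst htnil
      simp only [List.nil_append] at hdig hhd ⊢
      obtain ⟨hc1, hc2⟩ := hdig c (by simp)
      have hcz : c ≠ '0' := hhd c (by simp)
      have hcz' : c.toNat ≠ 48 := by
        intro h; exact hcz (char_eq_of_toNat (h.trans (by decide)))
      have hv : valC [c] = c.toNat - 48 := by
        show 10 * 0 + (c.toNat - 48) = _; omega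
      rw [hv, decChars_lt (by omega)]
      have : (c.toNat - 48).digitChar = c := by
        apply char_eq_of_toNat
        rw [digitChar_toNat (by omega)]
        omega
      rw [this]
    · have htne : t ≠ [] := htnil
      have hdig' : ∀ x ∈ t, 48 ≤ x.toNat ∧ x.toNat ≤ 57 := fun x hx => hdig x (by simp [hx])
      have hhd' : ∀ x, t.head? = some x → x ≠ '0' := by
        intro x hx
        apply hhd
        rw [List.head?_append_of_ne_nil _ htne]
        exact hx
      have iht := ih htne hdig' hhd'
      obtain ⟨hc1, hc2⟩ := hdig c (by simp)
      have hv' : 1 ≤ valC t := by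
        by_contra hc
        have h0 : valC t = 0 := by omega
        have : decChars 0 = t := by rw [← h0]; exact iht
        rw [decChars_lt (by omega)] at this
        have : t.head? = some '0' := by rw [← this]; rfl
        exact hhd' '0' this rfl
      have hval : valC (t ++ [c]) = 10 * valC t + (c.toNat - 48) := by
        rw [valC_append]
        have : valC [c] = 10 * 0 + (c.toNat - 48) := rfl
        rw [this]
        simp; ring
      rw [hval, decChars_ge (by omega)]
      have hdiv : (10 * valC t + (c.toNat - 48)) / 10 = valC t := by omega
      have hmod : (10 * valC t + (c.toNat - 48)) % 10 = c.toNat - 48 := by omega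
      rw [hdiv, hmod, iht]
      have : (c.toNat - 48).digitChar = c := by
        apply char_eq_of_toNat
        rw [digitChar_toNat (by omega)]
        omega
      rw [this]

-- the "repunit multiplier": repu d r = 1 + 10^d + 10^(2d) + … + 10^((r-1)d) = (10^(d*r)-1)/(10^d-1)
def repu (d : Nat) : Nat → Nat
  | 0 => 0
  | r + 1 => 10 ^ (d * r) + repu d r

lemma repu_mul (d r : Nat) : (10 ^ d - 1) * repu d r + 1 = 10 ^ (d * r) := by
  induction r with
  | zero => simp [repu]
  | succ r ih =>
    have hP : 1 ≤ 10 ^ d := Nat.one_le_pow _ _ (by omega)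
    have hX : 1 ≤ 10 ^ (d * r) := Nat.one_le_pow _ _ (by omega)
    have hpow : 10 ^ (d * (r + 1)) = 10 ^ (d * r) * 10 ^ d := by
      have h : d * (r + 1) = d * r + d := by ring
      rw [h, pow_add]
    rw [repu, Nat.mul_add, hpow]
    have e1 : (10 ^ d - 1) * 10 ^ (d * r) = 10 ^ (d * r) * 10 ^ d - 10 ^ (d * r) := by
      rw [Nat.sub_mul, one_mul, Nat.mul_comm]
    have hle : 10 ^ (d * r) ≤ 10 ^ (d * r) * 10 ^ d := Nat.le_mul_of_pos_right _ (by omega)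
    omega

lemma repu_pos (d : Nat) {r : Nat} (hr : 1 ≤ r) : 1 ≤ repu d r := by
  cases r with
  | zero => omega
  | succ r =>
    have h1 : 1 ≤ 10 ^ (d * r) := Nat.one_le_pow _ _ (by omega)
    show 1 ≤ 10 ^ (d * r) + repu d r
    omega

lemma repu_ge (d : Nat) {r : Nat} (hr : 1 ≤ r) : 10 ^ (d * (r - 1)) ≤ repu d r := by
  cases r with
  | zero => omega
  | succ r =>
    show 10 ^ (d * (r + 1 - 1)) ≤ 10 ^ (d * r) + repu d r
    simp only [Nat.add_sub_cancel]
    exact Nat.le_add_right _ _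

lemma repu_le_sub (d r : Nat) : (10 ^ d - 1) * repu d r = 10 ^ (d * r) - 1 := by
  have := repu_mul d r
  omega

-- str(a) ++ str(c) = str(a * 10^k + c) when c has exactly k digits
lemma decChars_concat : ∀ (k a c : Nat), 1 ≤ a → 1 ≤ k → 10 ^ (k - 1) ≤ c → c < 10 ^ k →
    decChars (a * 10 ^ k + c) = decChars a ++ decChars c := by
  intro k
  induction k with
  | zero => omega
  | succ k ihk =>
    intro a c ha _ hc1 hc2
    rcases Nat.eq_zero_or_pos k with rfl | hk
    · -- k = 1 overall: c is a single digit, 1 ≤ c < 10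
      have hpow : (10:Nat) ^ (0 + 1) = 10 := by norm_num
      have hc2' : c < 10 := by rw [hpow] at hc2; exact hc2
      have hc1' : 1 ≤ c := by simpa using hc1
      rw [hpow]
      have hge : 10 ≤ a * 10 + c := by omega
      rw [decChars_ge hge]
      have hdiv : (a * 10 + c) / 10 = a := by
        rw [Nat.mul_comm a 10, Nat.mul_add_div (by omega)]
        omega
      have hmod : (a * 10 + c) % 10 = c := by
        rw [Nat.mul_comm a 10, Nat.mul_add_mod]
        omega
      rw [hdiv, hmod, decChars_lt hc2']
    · -- k + 1 ≥ 2: peel the last digit of c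
      have hkpow : (10:Nat) ^ k ≤ 10 ^ (k + 1 - 1) := by simp
      have hc10 : 10 ≤ c := by
        have h1 : (10:Nat) ≤ 10 ^ k := by
          calc (10:Nat) = 10 ^ 1 := (pow_one 10).symm
          _ ≤ 10 ^ k := Nat.pow_le_pow_right (by omega) hk
        omega
      have hge : 10 ≤ a * 10 ^ (k + 1) + c := by omega
      rw [decChars_ge hge]
      have hrw : a * 10 ^ (k + 1) + c = c + 10 * (a * 10 ^ k) := by
        rw [pow_succ]; ring
      have hdiv : (a * 10 ^ (k + 1) + c) / 10 = a * 10 ^ k + c / 10 := by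
        rw [hrw, Nat.add_mul_div_left _ _ (by omega : (0:Nat) < 10)]
        omega
      have hmod : (a * 10 ^ (k + 1) + c) % 10 = c % 10 := by
        rw [hrw, Nat.add_mul_mod_self_left]
      have hcd1 : 10 ^ (k - 1) ≤ c / 10 := by
        have : 10 ^ (k + 1 - 1) / 10 ≤ c / 10 := Nat.div_le_div_right hc1
        have he : 10 ^ (k + 1 - 1) / 10 = 10 ^ (k - 1) := by
          have : k + 1 - 1 = (k - 1) + 1 := by omega
          rw [this, pow_succ, Nat.mul_div_cancel _ (by omega : (0:Nat) < 10)]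
        omega
      have hcd2 : c / 10 < 10 ^ k := by
        rw [Nat.div_lt_iff_lt_mul (by omega : (0:Nat) < 10)]
        rw [← pow_succ]
        exact hc2
      rw [hdiv, hmod, ihk a (c / 10) ha hk hcd1 hcd2, decChars_ge hc10, List.append_assoc]

-- str(b * repu d r) is str(b) repeated r times, for a d-digit block b
lemma decChars_block (d : Nat) {b : Nat} (hd : 1 ≤ d) (hb1 : 10 ^ (d - 1) ≤ b) (hb2 : b < 10 ^ d) :
    ∀ {r : Nat}, 1 ≤ r →
      decChars (b * repu d r) = (List.replicate r (decChars b)).flatten := by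
  have hb : 1 ≤ b := by
    have : 1 ≤ 10 ^ (d - 1) := Nat.one_le_pow _ _ (by omega)
    omega
  intro r hr
  induction r with
  | zero => omega
  | succ r ih =>
    rcases Nat.eq_zero_or_pos r with rfl | hrp
    · show decChars (b * (10 ^ (d * 0) + repu d 0)) = _
      simp [repu]
    · have ihr := ih hrp
      have hc1 : 10 ^ (d * r - 1) ≤ b * repu d r := by
        have h1 : 10 ^ (d - 1) * 10 ^ (d * (r - 1)) ≤ b * repu d r :=
          Nat.mul_le_mul hb1 (repu_ge d hrp)
        rw [← pow_add] at h1
        have he : d - 1 + d * (r - 1) = d * r - 1 := by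
          obtain ⟨s, rfl⟩ : ∃ s, r = s + 1 := ⟨r - 1, by omega⟩
          have e1 : d * (s + 1) = d * s + d := by ring
          simp only [Nat.add_sub_cancel]
          omega
        rw [he] at h1
        exact h1
      have hc2 : b * repu d r < 10 ^ (d * r) := by
        have h1 : b * repu d r ≤ (10 ^ d - 1) * repu d r := by
          apply Nat.mul_le_mul_right
          omega
        rw [repu_le_sub] at h1
        have : 1 ≤ 10 ^ (d * r) := Nat.one_le_pow _ _ (by omega)
        omega
      have hdr : 1 ≤ d * r := by
        rcases Nat.eq_zero_or_pos (d * r) with h | h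
        · rcases Nat.mul_eq_zero.mp h with h' | h' <;> omega
        · exact h
      have hsplit : b * repu d (r + 1) = b * 10 ^ (d * r) + b * repu d r := by
        show b * (10 ^ (d * r) + repu d r) = _
        ring
      rw [hsplit, decChars_concat (d * r) b (b * repu d r) hb hdr hc1 hc2, ihr]
      rfl

lemma flatten_replicate_len (t : List Char) : ∀ r : Nat,
    ((List.replicate r t).flatten).length = r * t.length := by
  intro r
  induction r with
  | zero => simp
  | succ r ih =>
    rw [List.replicate_succ, List.flatten_cons, List.length_append, ih]
    ring

lemma valC_flatten_replicate (t : List Char) : ∀ r : Nat,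
    valC (List.replicate r t).flatten = valC t * repu t.length r := by
  intro r
  induction r with
  | zero => simp [valC, repu]
  | succ r ih =>
    rw [List.replicate_succ, List.flatten_cons, valC_append, ih, flatten_replicate_len]
    show valC t * 10 ^ (r * t.length) + valC t * repu t.length r
        = valC t * (10 ^ (t.length * r) + repu t.length r)
    rw [Nat.mul_add, Nat.mul_comm r t.length]

lemma band_lower {X Y R : Nat} (hR : 1 ≤ R) (hX : 1 ≤ X) (hY : 1 ≤ Y)
    (hE : (10 * X - 1) * R = 10 * Y - 1) : R * (X - 1) < Y := by
  zify [hX, show (1:Nat) ≤ 10 * X by omega, show (1:Nat) ≤ 10 * Y by omega] at hE ⊢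
  nlinarith [hE, hR, hX, hY]

-- the main characterization: the digit string of m is its d-prefix repeated iff the
-- repunit multiplier divides m
lemma flatten_char {m d : Nat} (hm : 1 ≤ m) (hd : 1 ≤ d) (hdvd : d ∣ (decChars m).length) :
    (List.replicate ((decChars m).length / d) ((decChars m).take d)).flatten = decChars m
      ↔ repu d ((decChars m).length / d) ∣ m := by
  have hL : 1 ≤ (decChars m).length := decChars_len_pos m
  set L := (decChars m).length with hLdef
  set r := L / d with hrdef
  have hdL : d ≤ L := Nat.le_of_dvd (by omega) hdvd
  have hr1 : 1 ≤ r := by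
    rw [hrdef, Nat.le_div_iff_mul_le (by omega)]
    omega
  have hrd : d * r = L := Nat.mul_div_cancel' hdvd
  have ht : ((decChars m).take d).length = d := by
    rw [List.length_take]
    omega
  obtain ⟨c0, s0, hs0⟩ : ∃ c0 s0, decChars m = c0 :: s0 := by
    cases h : decChars m with
    | nil => exact absurd h (decChars_ne_nil m)
    | cons a b => exact ⟨a, b, rfl⟩
  have hthead : ((decChars m).take d).head? = (decChars m).head? := by
    obtain ⟨d', rfl⟩ : ∃ d', d = d' + 1 := ⟨d - 1, by omega⟩
    rw [hs0, List.take_succ_cons]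
    rfl
  constructor
  · intro hf
    have hdig : ∀ c ∈ (decChars m).take d, 48 ≤ c.toNat ∧ c.toNat ≤ 57 :=
      fun c hc => decChars_digits c (List.take_subset _ _ hc)
    have hhd : ∀ c, ((decChars m).take d).head? = some c → c ≠ '0' := by
      intro c hc
      rw [hthead] at hc
      exact decChars_head_ne_zero hm c hc
    have htne : (decChars m).take d ≠ [] := by
      intro hc
      rw [← List.length_eq_zero_iff] at hc
      omega
    have hdv := decChars_valC _ htne hdig hhd
    have hval : valC (decChars m) = valC ((decChars m).take d) * repu d r := by
      conv_lhs => rw [← hf]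
      rw [valC_flatten_replicate, ht]
    rw [valC_decChars] at hval
    exact Dvd.intro_left _ hval.symm
  · intro hdvd2
    obtain ⟨b, hb⟩ := hdvd2
    have hbpos : 1 ≤ b := by
      rcases Nat.eq_zero_or_pos b with rfl | h
      · omega
      · exact h
    have hrepos : 1 ≤ repu d r := repu_pos d hr1
    obtain ⟨hm1, hm2⟩ := decChars_bounds hm
    rw [← hLdef] at hm1 hm2
    -- upper bound: b < 10^d
    have hbu : b < 10 ^ d := by
      by_contra hc
      rw [not_lt] at hc
      have h1 : repu d r * 10 ^ d ≤ repu d r * b := Nat.mul_le_mul_left _ hc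
      have h2 : 10 ^ (d * (r - 1)) * 10 ^ d ≤ repu d r * 10 ^ d :=
        Nat.mul_le_mul_right _ (repu_ge d hr1)
      rw [← pow_add] at h2
      have he : d * (r - 1) + d = L := by
        obtain ⟨s, hs⟩ : ∃ s, r = s + 1 := ⟨r - 1, by omega⟩
        rw [hs] at hrd ⊢
        have e1 : d * (s + 1) = d * s + d := by ring
        simp only [Nat.add_sub_cancel]
        omega
      rw [he] at h2
      omega
    -- lower bound: 10^(d-1) ≤ b
    have hbl : 10 ^ (d - 1) ≤ b := by
      by_contra hc
      rw [not_le] at hc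
      have hkey : repu d r * (10 ^ (d - 1) - 1) < 10 ^ (L - 1) := by
        apply band_lower hrepos (Nat.one_le_pow _ _ (by omega)) (Nat.one_le_pow _ _ (by omega))
        have e1 : 10 * 10 ^ (d - 1) = 10 ^ d := by
          rw [Nat.mul_comm, ← pow_succ]
          congr 1
          omega
        have e2 : 10 * 10 ^ (L - 1) = 10 ^ L := by
          rw [Nat.mul_comm, ← pow_succ]
          congr 1
          omega
        rw [e1, e2, repu_le_sub, hrd]
      have h1 : repu d r * b ≤ repu d r * (10 ^ (d - 1) - 1) :=
        Nat.mul_le_mul_left _ (by omega)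
      omega
    have hlenb : (decChars b).length = d := (decChars_len_eq_iff hbpos hd).mpr ⟨hbl, hbu⟩
    have hblock : decChars m = (List.replicate r (decChars b)).flatten := by
      rw [hb, Nat.mul_comm]
      exact decChars_block d hd hbl hbu hr1
    have htake : (decChars m).take d = decChars b := by
      obtain ⟨s, hs⟩ : ∃ s, r = s + 1 := ⟨r - 1, by omega⟩
      rw [hblock, hs, List.replicate_succ, List.flatten_cons]
      exact List.take_left' hlenb
    rw [htake, ← hblock]

lemma matchLoop_eq_all (s : List Char) (sz : Int) (is : List Int) :
    pvMatchLoop s sz is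
      = is.all (fun i => decide (PySem.List.slice s (some i) (some (i + sz)) = PySem.List.slice s (some 0) (some sz))) := by
  induction is with
  | nil => rfl
  | cons i rest ih =>
    simp only [pvMatchLoop, List.all_cons]
    by_cases h : PySem.List.slice s (some i) (some (i + sz)) = PySem.List.slice s (some 0) (some sz) <;>
      simp [h, ih]

lemma szLoop_eq_any (s : List Char) (l : Int) (szs : List Int) (checked : PySem.Set Int) :
    pvSzLoop s l szs checked
      = szs.any (fun sz => decide (PySem.Int.mod l sz = 0) && pvMatchLoop s sz (PySem.List.pyRange sz l sz)) := by
  induction szs generalizing checked with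
  | nil => rfl
  | cons sz rest ih =>
    simp only [pvSzLoop, List.any_cons]
    by_cases h1 : PySem.Int.mod l sz = 0
    · rw [if_neg (by simp [h1])]
      by_cases h2 : pvMatchLoop s sz (PySem.List.pyRange sz l sz) = true
      · simp [h1, h2]
      · simp only [Bool.not_eq_true] at h2
        simp [h1, h2, ih]
    · simp [h1, ih]

lemma flatten_replicate_iff {α : Type} (b : List α) (n : Nat) (hb : b.length = n) :
    ∀ (m : Nat) (t : List α), t.length = m * n →
      ((List.replicate m b).flatten = t ↔ ∀ j < m, (t.drop (n * j)).take n = b) := by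
  intro m
  induction m with
  | zero =>
    intro t ht
    have : t = [] := List.eq_nil_of_length_eq_zero (by omega)
    subst this
    simp
  | succ m ih =>
    intro t ht
    have hlen : n ≤ t.length := by
      have : 1 * n ≤ (m + 1) * n := Nat.mul_le_mul_right n (by omega)
      omega
    have ht' : (t.drop n).length = m * n := by
      have hexp : (m + 1) * n = m * n + n := by ring
      simp only [List.length_drop]
      omega
    constructor
    · intro h j hj
      cases j with
      | zero =>
        rw [Nat.mul_zero, List.drop_zero, ← h]
        simp only [List.replicate_succ, List.flatten_cons]
        exact List.take_left' hb
      | succ q =>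
        have hq : q < m := by omega
        have hdrop : t.drop n = (List.replicate m b).flatten := by
          rw [← h]
          simp only [List.replicate_succ, List.flatten_cons]
          exact List.drop_left' hb
        have hblk := ((ih (t.drop n) ht').mp hdrop.symm) q hq
        rw [List.drop_drop] at hblk
        have harith : n + n * q = n * (q + 1) := by ring
        rw [harith] at hblk
        exact hblk
    · intro h
      have h0 : t.take n = b := by
        have := h 0 (by omega)
        simpa using this
      have hrest : ∀ j < m, ((t.drop n).drop (n * j)).take n = b := by
        intro j hj
        rw [List.drop_drop]
        have harith : n + n * j = n * (j + 1) := by ring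
        rw [harith]
        exact h (j + 1) (by omega)
      have hF : (List.replicate m b).flatten = t.drop n := (ih (t.drop n) ht').mpr hrest
      simp only [List.replicate_succ, List.flatten_cons]
      rw [hF, ← h0, List.take_append_drop]

lemma elem_iff (s : List Char) (x : Int) (hx : 0 < x)
    (hmod : PySem.Int.mod (s.length : Int) x = 0) :
    (pvMatchLoop s x (PySem.List.pyRange x (s.length : Int) x) = true)
      ↔ PySem.List.pyRepeat (PySem.List.slice s (some 0) (some x)) (PySem.Int.floordiv (s.length : Int) x) = s := by
  obtain ⟨n, rfl⟩ : ∃ n : Nat, x = (n : Int) := ⟨x.toNat, (Int.toNat_of_nonneg hx.le).symm⟩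
  have hn : 0 < n := by exact_mod_cast hx
  have hd : n ∣ s.length := by
    have h := (PySem.Int.mod_eq_zero_iff_dvd _ _).mp hmod
    exact_mod_cast h
  obtain ⟨m, hm⟩ := hd
  have hslice0 : PySem.List.slice s (some 0) (some (n : Int)) = s.take n := by
    simp [PySem.List.slice_zero_start, PySem.List.slice_to_natCast]
  have hfd : PySem.Int.floordiv (s.length : Int) (n : Int) = ((s.length / n : Nat) : Int) :=
    PySem.Int.floordiv_natCast s.length n
  have hdivm : s.length / n = m := by rw [hm]; exact Nat.mul_div_cancel_left m hn
  have hrep : PySem.List.pyRepeat (s.take n) ((m : Nat) : Int) = (List.replicate m (s.take n)).flatten := by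
    simp [PySem.List.pyRepeat]
  rw [matchLoop_eq_all, hslice0, hfd, hdivm, hrep]
  rcases Nat.eq_zero_or_pos m with hm0 | hmpos
  · subst hm0
    have hs : s = [] := List.eq_nil_of_length_eq_zero (by omega)
    subst hs
    have hrange : PySem.List.pyRange (n : Int) 0 (n : Int) = [] := by
      rw [PySem.List.pyRange_of_pos _ _ (by exact_mod_cast hn)]
      have hlt0 : ¬ ((n : Int) < 0) := by omega
      simp [hlt0]
    simp [hrange]
  · have hsl_len : s.length = m * n := by rw [hm, Nat.mul_comm]
    have hb : (s.take n).length = n := by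
      simp only [List.length_take]
      have hle : n ≤ s.length := by
        have h1 : 1 * n ≤ m * n := Nat.mul_le_mul_right n hmpos
        omega
      omega
    have hkey := flatten_replicate_iff (s.take n) n hb m s hsl_len
    rw [List.all_eq_true]
    constructor
    · intro H
      refine hkey.mpr ?_
      intro j hj
      cases j with
      | zero => simp
      | succ q =>
        have hmem : ((n * (q + 1) : Nat) : Int) ∈ PySem.List.pyRange (n : Int) ((s.length : Nat) : Int) (n : Int) := by
          rw [PySem.List.mem_pyRange_iff_of_pos (by exact_mod_cast hn)]
          have hge' : n ≤ n * (q + 1) := by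
            have h1 : n * 1 ≤ n * (q + 1) := Nat.mul_le_mul (le_refl n) (by omega)
            simpa using h1
          refine ⟨by exact_mod_cast hge', ?_, ?_⟩
          · have hq1 : n * (q + 1) < s.length := by
              have h2 : n * (q + 1) < n * m := by
                rw [Nat.mul_comm n (q + 1), Nat.mul_comm n m]
                exact (Nat.mul_lt_mul_right hn).mpr (by omega)
              omega
            exact_mod_cast hq1
          · refine ⟨(q : Int), ?_⟩
            push_cast
            ring
        have hP := H _ hmem
        rw [decide_eq_true_eq] at hP
        have hsl : PySem.List.slice s (some ((n * (q + 1) : Nat) : Int))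
            (some (((n * (q + 1) : Nat) : Int) + (n : Int))) = (s.drop (n * (q + 1))).take n :=
          PySem.List.slice_natCast_add s (n * (q + 1)) n
        rw [hsl] at hP
        exact hP
    · intro H i hi
      rw [PySem.List.mem_pyRange_iff_of_pos (by exact_mod_cast hn)] at hi
      obtain ⟨hge, hlt, t, htt⟩ := hi
      have ht0 : 0 ≤ t := by
        have hnpos : (0 : Int) < (n : Int) := by exact_mod_cast hn
        have hge' : (n : Int) * 0 ≤ (n : Int) * t := by
          rw [mul_zero, ← htt]
          omega
        exact le_of_mul_le_mul_left hge' hnpos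
      obtain ⟨q, rfl⟩ : ∃ q : Nat, t = (q : Int) := ⟨t.toNat, (Int.toNat_of_nonneg ht0).symm⟩
      have hieq : i = ((n * (q + 1) : Nat) : Int) := by
        push_cast
        linarith
      subst hieq
      have hqlt : q + 1 < m := by
        have h1 : n * (q + 1) < s.length := by exact_mod_cast hlt
        rw [hm] at h1
        by_contra hc
        have hc' : m ≤ q + 1 := by omega
        have h2 : n * m ≤ n * (q + 1) := Nat.mul_le_mul (le_refl n) hc'
        omega
      rw [decide_eq_true_eq]
      have hsl : PySem.List.slice s (some ((n * (q + 1) : Nat) : Int))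
          (some (((n * (q + 1) : Nat) : Int) + (n : Int))) = (s.drop (n * (q + 1))).take n :=
        PySem.List.slice_natCast_add s (n * (q + 1)) n
      rw [hsl]
      exact (hkey.mp H) (q + 1) hqlt

lemma bool_ext {a b : Bool} (h : a = true ↔ b = true) : a = b := by
  cases a <;> cases b <;> simp_all

lemma halves_iff (s : List Char) (heven : PySem.Int.mod (s.length : Int) 2 = 0) :
    (PySem.List.slice s (some 0) (some (PySem.Int.floordiv (s.length : Int) 2))
        = PySem.List.slice s (some (PySem.Int.floordiv (s.length : Int) 2)) none)
      ↔ PySem.List.pyRepeat (PySem.List.slice s (some 0) (some (PySem.Int.floordiv (s.length : Int) 2))) 2 = s := by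
  have hfd : PySem.Int.floordiv (s.length : Int) 2 = ((s.length / 2 : Nat) : Int) := by
    exact_mod_cast PySem.Int.floordiv_natCast s.length 2
  have hdvd : (2 : Int) ∣ (s.length : Int) := (PySem.Int.mod_eq_zero_iff_dvd _ _).mp heven
  have hdvd' : 2 ∣ s.length := by exact_mod_cast hdvd
  have hL : s.length = s.length / 2 + s.length / 2 := by omega
  have hslice0 : PySem.List.slice s (some 0) (some ((s.length / 2 : Nat) : Int)) = s.take (s.length / 2) := by
    rw [PySem.List.slice_zero_start]
    exact PySem.List.slice_to_natCast s (s.length / 2)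
  have hslice1 : PySem.List.slice s (some ((s.length / 2 : Nat) : Int)) none = s.drop (s.length / 2) :=
    PySem.List.slice_from_natCast s (s.length / 2)
  rw [hfd, hslice0, hslice1]
  have hrep : PySem.List.pyRepeat (s.take (s.length / 2)) 2
      = s.take (s.length / 2) ++ s.take (s.length / 2) := by
    simp [PySem.List.pyRepeat, List.replicate]
  rw [hrep]
  constructor
  · intro h
    calc s.take (s.length / 2) ++ s.take (s.length / 2)
        = s.take (s.length / 2) ++ s.drop (s.length / 2) := by rw [h]
      _ = s := List.take_append_drop _ s
  · intro h
    have h2 : s.take (s.length / 2) ++ s.take (s.length / 2)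
        = s.take (s.length / 2) ++ s.drop (s.length / 2) := by
      rw [h, List.take_append_drop]
    exact List.append_cancel_left h2

-- canonical arithmetic forms of A's two per-number tests
def ppB (x : Int) : Bool :=
  decide (0 < x) &&
  (List.range ((decChars x.toNat).length / 2 + 1)).any (fun d =>
    decide (1 ≤ d) && decide (d ∣ (decChars x.toNat).length) &&
    decide (repu d ((decChars x.toNat).length / d) ∣ x.toNat))

def phB (x : Int) : Bool :=
  decide (0 < x) && decide (2 ∣ (decChars x.toNat).length) &&
  decide (repu ((decChars x.toNat).length / 2) 2 ∣ x.toNat)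

lemma pyRepeat_take (s : List Char) (szN : Nat) :
    PySem.List.pyRepeat (PySem.List.slice s (some 0) (some (szN : Int)))
        (PySem.Int.floordiv (s.length : Int) (szN : Int))
      = (List.replicate (s.length / szN) (s.take szN)).flatten := by
  have hslice0 : PySem.List.slice s (some 0) (some (szN : Int)) = s.take szN := by
    rw [PySem.List.slice_zero_start]
    exact PySem.List.slice_to_natCast s szN
  rw [hslice0, PySem.Int.floordiv_natCast]
  simp only [PySem.List.pyRepeat, Int.toNat_natCast]

lemma szLoop_iff (s : List Char) :
    (pvSzLoop s (s.length : Int)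
        (PySem.List.pyRange (PySem.Int.floordiv ((s.length : Nat) : Int) 2) 0 (-1))
        PySem.Set.empty = true)
    ↔ ∃ szN : Nat, 1 ≤ szN ∧ szN ≤ s.length / 2 ∧ szN ∣ s.length ∧
        (List.replicate (s.length / szN) (s.take szN)).flatten = s := by
  rw [szLoop_eq_any, List.any_eq_true]
  have hfd : PySem.Int.floordiv ((s.length : Nat) : Int) 2 = ((s.length / 2 : Nat) : Int) :=
    PySem.Int.floordiv_natCast s.length 2
  constructor
  · rintro ⟨sz, hmem, hcond⟩
    rw [hfd, PySem.List.mem_pyRange_neg_one] at hmem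
    rw [Bool.and_eq_true, decide_eq_true_eq] at hcond
    obtain ⟨hmod, hml⟩ := hcond
    have h0 : 0 < sz := hmem.1
    obtain ⟨szN, rfl⟩ : ∃ n : Nat, sz = (n : Int) := ⟨sz.toNat, (Int.toNat_of_nonneg h0.le).symm⟩
    have hdvd : szN ∣ s.length := by
      have h := (PySem.Int.mod_eq_zero_iff_dvd _ _).mp hmod
      exact_mod_cast h
    refine ⟨szN, by exact_mod_cast h0, by exact_mod_cast hmem.2, hdvd, ?_⟩
    rw [← pyRepeat_take]
    exact (elem_iff s _ h0 hmod).mp hml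
  · rintro ⟨szN, h1, h2, hdvd, hflat⟩
    refine ⟨(szN : Int), ?_, ?_⟩
    · rw [hfd, PySem.List.mem_pyRange_neg_one]
      exact ⟨by exact_mod_cast h1, by exact_mod_cast h2⟩
    · have hmod : PySem.Int.mod ((s.length : Nat) : Int) (szN : Int) = 0 := by
        rw [PySem.Int.mod_eq_zero_iff_dvd]
        exact_mod_cast hdvd
      rw [Bool.and_eq_true, decide_eq_true_eq]
      refine ⟨hmod, ?_⟩
      rw [elem_iff s _ (by exact_mod_cast h1) hmod, pyRepeat_take]
      exact hflat

lemma neg_no_period {num : Int} (hneg : num < 0) :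
    ∀ szN : Nat, 1 ≤ szN → szN ≤ (PySem.Int.toChars num).length / 2 →
      szN ∣ (PySem.Int.toChars num).length →
      (List.replicate ((PySem.Int.toChars num).length / szN)
        ((PySem.Int.toChars num).take szN)).flatten ≠ PySem.Int.toChars num := by
  intro szN h1 h2 hdvd hflat
  set s := PySem.Int.toChars num with hsdef
  have hs : s = '-' :: decChars num.natAbs := toChars_of_neg hneg
  set L := s.length with hLdef
  have hL2 : 2 * szN ≤ L := by omega
  have hr2 : 2 ≤ L / szN := by
    rw [Nat.le_div_iff_mul_le (by omega)]
    omega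
  have hszL : szN < L := by omega
  have ht : (s.take szN).length = szN := by
    rw [List.length_take]
    omega
  -- index szN of the flattened replication is the head of the block, i.e. '-'
  obtain ⟨r2, hr⟩ : ∃ r2, L / szN = r2 + 2 := ⟨L / szN - 2, by omega⟩
  have htne : 0 < (s.take szN).length := by omega
  have hhd : (s.take szN)[0]? = some '-' := by
    obtain ⟨j, rfl⟩ : ∃ j, szN = j + 1 := ⟨szN - 1, by omega⟩
    rw [hs, List.take_succ_cons]
    rfl
  have hlhs : ((List.replicate (L / szN) (s.take szN)).flatten)[szN]? = some '-' := by
    rw [hr, List.replicate_succ, List.replicate_succ, List.flatten_cons, List.flatten_cons]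
    rw [List.getElem?_append_right (by omega : (s.take szN).length ≤ szN), ht]
    simp only [Nat.sub_self]
    rw [List.getElem?_append_left htne]
    exact hhd
  -- but index szN of s itself is a digit of decChars num.natAbs
  have hrhs : ∃ c, s[szN]? = some c ∧ 48 ≤ c.toNat := by
    obtain ⟨j, rfl⟩ : ∃ j, szN = j + 1 := ⟨szN - 1, by omega⟩
    rw [hs]
    have hjlt : j < (decChars num.natAbs).length := by
      have : L = (decChars num.natAbs).length + 1 := by rw [hLdef, hs]; simp
      omega
    rw [List.getElem?_cons_succ]
    refine ⟨(decChars num.natAbs)[j], by rw [List.getElem?_eq_getElem hjlt], ?_⟩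
    exact (decChars_digits _ (List.getElem_mem hjlt)).1
  obtain ⟨c, hc, hc48⟩ := hrhs
  rw [hflat, hc] at hlhs
  have : c = '-' := by injection hlhs
  subst this
  revert hc48
  decide

lemma A_per (num : Int) :
    pvSzLoop (PySem.Int.toChars num) (((PySem.Int.toChars num).length : Nat) : Int)
      (PySem.List.pyRange (PySem.Int.floordiv (((PySem.Int.toChars num).length : Nat) : Int) 2) 0 (-1))
      PySem.Set.empty = ppB num := by
  apply bool_ext
  rw [szLoop_iff]
  by_cases hpos : 0 < num
  · have hnn : 0 ≤ num := hpos.le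
    have hm1 : 1 ≤ num.toNat := by omega
    rw [toChars_of_nonneg hnn]
    unfold ppB
    rw [Bool.and_eq_true, decide_eq_true_eq, List.any_eq_true]
    constructor
    · rintro ⟨szN, h1, h2, hdvd, hflat⟩
      refine ⟨hpos, szN, List.mem_range.mpr (by omega), ?_⟩
      rw [Bool.and_eq_true, Bool.and_eq_true, decide_eq_true_eq, decide_eq_true_eq,
        decide_eq_true_eq]
      exact ⟨⟨h1, hdvd⟩, (flatten_char hm1 h1 hdvd).mp hflat⟩
    · rintro ⟨-, d, hdr, hcond⟩
      rw [Bool.and_eq_true, Bool.and_eq_true, decide_eq_true_eq, decide_eq_true_eq,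
        decide_eq_true_eq] at hcond
      obtain ⟨⟨h1, hdvd⟩, hdvd2⟩ := hcond
      have h2 : d ≤ (decChars num.toNat).length / 2 := by
        have := List.mem_range.mp hdr
        omega
      exact ⟨d, h1, h2, hdvd, (flatten_char hm1 h1 hdvd).mpr hdvd2⟩
  · constructor
    · rintro ⟨szN, h1, h2, hdvd, hflat⟩
      rcases lt_or_ge num 0 with hneg | hge
      · exact absurd hflat (neg_no_period hneg szN h1 h2 hdvd)
      · -- num = 0: toChars 0 = ['0'], length 1, so szN ≤ 0 contradicts 1 ≤ szN
        have h0 : num = 0 := by omega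
        subst h0
        rw [toChars_of_nonneg le_rfl] at h2
        have : (decChars (Int.toNat 0)).length = 1 := by
          rw [show Int.toNat 0 = 0 from rfl, decChars_lt (by omega)]
          rfl
        omega
    · intro hc
      unfold ppB at hc
      rw [Bool.and_eq_true, decide_eq_true_eq] at hc
      exact absurd hc.1 hpos

lemma pyRepeat_two (t : List Char) : PySem.List.pyRepeat t 2 = (List.replicate 2 t).flatten := by
  simp [PySem.List.pyRepeat]

lemma fd2_natCast (L : Nat) :
    PySem.Int.floordiv ((L : Nat) : Int) 2 = ((L / 2 : Nat) : Int) := by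
  exact_mod_cast PySem.Int.floordiv_natCast L 2

lemma mod2_natCast (L : Nat) : (PySem.Int.mod ((L : Nat) : Int) 2 = 0 ↔ 2 ∣ L) := by
  rw [PySem.Int.mod_eq_zero_iff_dvd]
  exact ⟨fun h => by exact_mod_cast h, fun h => by exact_mod_cast h⟩

lemma hsl0 (s : List Char) : PySem.List.slice s (some 0)
    (some (PySem.Int.floordiv ((s.length : Nat) : Int) 2)) = s.take (s.length / 2) := by
  rw [fd2_natCast, PySem.List.slice_zero_start]
  exact PySem.List.slice_to_natCast s (s.length / 2)

lemma hsl1 (s : List Char) : PySem.List.slice s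
    (some (PySem.Int.floordiv ((s.length : Nat) : Int) 2)) none = s.drop (s.length / 2) := by
  rw [fd2_natCast]
  exact PySem.List.slice_from_natCast s (s.length / 2)

lemma half_flatten_iff {m : Nat} (hm : 1 ≤ m) (hdvd2 : 2 ∣ (decChars m).length) :
    ((List.replicate 2 ((decChars m).take ((decChars m).length / 2))).flatten = decChars m)
      ↔ repu ((decChars m).length / 2) 2 ∣ m := by
  have hL1 : 1 ≤ (decChars m).length := decChars_len_pos _
  obtain ⟨k, hk⟩ := hdvd2
  have hq : (decChars m).length / ((decChars m).length / 2) = 2 :=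
    Nat.div_eq_of_eq_mul_left (by omega) (by omega)
  have hd1 : 1 ≤ (decChars m).length / 2 := by omega
  have hddvd : (decChars m).length / 2 ∣ (decChars m).length := ⟨2, by omega⟩
  have := flatten_char hm hd1 hddvd
  rw [hq] at this
  exact this

lemma A_half (num : Int) :
    ((PySem.Int.mod (((PySem.Int.toChars num).length : Nat) : Int) 2 = 0) ∧
      PySem.List.slice (PySem.Int.toChars num) (some 0)
          (some (PySem.Int.floordiv (((PySem.Int.toChars num).length : Nat) : Int) 2))
        = PySem.List.slice (PySem.Int.toChars num)
            (some (PySem.Int.floordiv (((PySem.Int.toChars num).length : Nat) : Int) 2)) none)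
    ↔ phB num = true := by
  by_cases hpos : 0 < num
  · have hnn : 0 ≤ num := hpos.le
    have hm1 : 1 ≤ num.toNat := by omega
    have hs : PySem.Int.toChars num = decChars num.toNat := toChars_of_nonneg hnn
    rw [hs]
    unfold phB
    rw [Bool.and_eq_true, Bool.and_eq_true, decide_eq_true_eq, decide_eq_true_eq,
      decide_eq_true_eq, mod2_natCast]
    constructor
    · rintro ⟨hdvd2, hslices⟩
      refine ⟨⟨hpos, hdvd2⟩, ?_⟩
      have heven : PySem.Int.mod (((decChars num.toNat).length : Nat) : Int) 2 = 0 :=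
        (mod2_natCast _).mpr hdvd2
      have hflat := (halves_iff _ heven).mp hslices
      rw [hsl0, pyRepeat_two] at hflat
      exact (half_flatten_iff hm1 hdvd2).mp hflat
    · rintro ⟨⟨-, hdvd2⟩, hrep⟩
      refine ⟨hdvd2, ?_⟩
      have heven : PySem.Int.mod (((decChars num.toNat).length : Nat) : Int) 2 = 0 :=
        (mod2_natCast _).mpr hdvd2
      rw [halves_iff _ heven, hsl0, pyRepeat_two]
      exact (half_flatten_iff hm1 hdvd2).mpr hrep
  · constructor
    · rintro ⟨heven, hslices⟩
      exfalso
      rcases lt_or_ge num 0 with hneg | hge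
      · have hs : PySem.Int.toChars num = '-' :: decChars num.natAbs := toChars_of_neg hneg
        have hdvd2 : 2 ∣ (PySem.Int.toChars num).length := (mod2_natCast _).mp heven
        obtain ⟨k, hk⟩ := hdvd2
        have hL : (PySem.Int.toChars num).length = (decChars num.natAbs).length + 1 := by
          rw [hs]; simp
        have hlp := decChars_len_pos num.natAbs
        have hk1 : 1 ≤ (PySem.Int.toChars num).length / 2 := by omega
        have hkL : (PySem.Int.toChars num).length / 2 < (PySem.Int.toChars num).length := by omega
        rw [hsl0, hsl1] at hslices
        have h0 : ((PySem.Int.toChars num).take ((PySem.Int.toChars num).length / 2))[0]?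
            = some '-' := by
          obtain ⟨j, hj⟩ : ∃ j, (PySem.Int.toChars num).length / 2 = j + 1 :=
            ⟨(PySem.Int.toChars num).length / 2 - 1, by omega⟩
          rw [hj, hs, List.take_succ_cons]
          rfl
        have h1 : ∃ c, ((PySem.Int.toChars num).drop ((PySem.Int.toChars num).length / 2))[0]?
            = some c ∧ 48 ≤ c.toNat := by
          rw [List.getElem?_drop]
          obtain ⟨j, hj⟩ : ∃ j, (PySem.Int.toChars num).length / 2 = j + 1 :=
            ⟨(PySem.Int.toChars num).length / 2 - 1, by omega⟩
          rw [hj, Nat.add_zero, hs, List.getElem?_cons_succ]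
          have hjlt : j < (decChars num.natAbs).length := by omega
          refine ⟨(decChars num.natAbs)[j], by rw [List.getElem?_eq_getElem hjlt], ?_⟩
          exact (decChars_digits _ (List.getElem_mem hjlt)).1
        obtain ⟨c, hc, hc48⟩ := h1
        rw [hslices, hc] at h0
        have hcm : c = '-' := by injection h0
        subst hcm
        revert hc48
        decide
      · have h0 : num = 0 := by omega
        subst h0
        rw [toChars_of_nonneg le_rfl] at heven
        have hlen : (decChars (Int.toNat 0)).length = 1 := by
          rw [show Int.toNat 0 = 0 from rfl, decChars_lt (by omega)]
          rfl
        rw [hlen, mod2_natCast] at heven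
        omega
    · intro hc
      unfold phB at hc
      rw [Bool.and_eq_true, Bool.and_eq_true, decide_eq_true_eq] at hc
      exact absurd hc.1.1 hpos

lemma foldl_split (p q : Int → Bool) : ∀ (l : List Int) (s1 s2 : Int),
    l.foldl (fun acc num =>
        (if p num then acc.1 + num else acc.1, if q num then acc.2 + num else acc.2)) (s1, s2)
      = (s1 + (l.filter p).sum, s2 + (l.filter q).sum) := by
  intro l
  induction l with
  | nil => intro s1 s2; simp
  | cons x l ih =>
    intro s1 s2
    rw [List.foldl_cons]
    dsimp only
    rw [ih]
    by_cases hp : p x <;> by_cases hq : q x <;>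
      simp [hp, hq, add_assoc]

lemma A_eq (start stop : Int) :
    solve_range start stop
      = (((PySem.List.pyRange start (stop + 1) 1).filter phB).sum,
         ((PySem.List.pyRange start (stop + 1) 1).filter ppB).sum) := by
  unfold solve_range
  have hfun : (fun (acc : Int × Int) (num : Int) =>
      let strnum := PySem.Int.toChars num
      let l : Int := strnum.length
      let sum2 := if pvSzLoop strnum l (PySem.List.pyRange (PySem.Int.floordiv l 2) 0 (-1)) PySem.Set.empty
                  then acc.2 + num else acc.2
      if PySem.Int.mod l 2 ≠ 0 then (acc.1, sum2)
      else if PySem.List.slice strnum (some 0) (some (PySem.Int.floordiv l 2))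
              = PySem.List.slice strnum (some (PySem.Int.floordiv l 2)) none
      then (acc.1 + num, sum2) else (acc.1, sum2))
      = (fun acc num =>
        (if phB num then acc.1 + num else acc.1, if ppB num then acc.2 + num else acc.2)) := by
    funext acc num
    dsimp only
    rw [A_per num]
    by_cases hm : PySem.Int.mod (((PySem.Int.toChars num).length : Nat) : Int) 2 = 0
    · rw [if_neg (not_not_intro hm)]
      by_cases hh : PySem.List.slice (PySem.Int.toChars num) (some 0)
          (some (PySem.Int.floordiv (((PySem.Int.toChars num).length : Nat) : Int) 2))
        = PySem.List.slice (PySem.Int.toChars num)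
            (some (PySem.Int.floordiv (((PySem.Int.toChars num).length : Nat) : Int) 2)) none
      · have hph : phB num = true := (A_half num).mp ⟨hm, hh⟩
        rw [if_pos hh, hph, if_pos rfl]
      · have hph : phB num = false := by
          cases hphv : phB num
          · rfl
          · exact absurd ((A_half num).mpr hphv).2 hh
        rw [if_neg hh, hph]
        simp
    · have hph : phB num = false := by
        cases hphv : phB num
        · rfl
        · exact absurd ((A_half num).mpr hphv).1 hm
      rw [if_pos hm, hph]
      simp
  rw [hfun, foldl_split]
  simp

lemma foldl_mem_acc {α σ : Type} (g : σ → α → σ) (π : σ → List Int) (P : α → Int → Prop)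
    (hg : ∀ st a x, x ∈ π (g st a) ↔ x ∈ π st ∨ P a x) :
    ∀ (l : List α) (st : σ) (x : Int),
      x ∈ π (l.foldl g st) ↔ x ∈ π st ∨ ∃ a ∈ l, P a x := by
  intro l
  induction l with
  | nil => intro st x; simp
  | cons a l ih =>
    intro st x
    rw [List.foldl_cons, ih, hg]
    simp only [List.mem_cons]
    constructor
    · rintro ((h | h) | ⟨b, hb, h⟩)
      · exact Or.inl h
      · exact Or.inr ⟨a, Or.inl rfl, h⟩
      · exact Or.inr ⟨b, Or.inr hb, h⟩
    · rintro (h | ⟨b, (rfl | hb), h⟩)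
      · exact Or.inl (Or.inl h)
      · exact Or.inl (Or.inr h)
      · exact Or.inr ⟨b, hb, h⟩

-- B decomposed (definitionally equal to the port)
abbrev pvSt : Type := PySem.Set Int × PySem.Set Int

def maxLenI (stop : Int) : Int := if 0 < stop then ((PySem.Int.toChars stop).length : Int) else 0

def repI (L d : Int) : Int := PySem.Int.floordiv (10 ^ L.toNat - 1) (10 ^ d.toNat - 1)

def pvF3 (start stop L d rep : Int) : pvSt → Int → pvSt := fun st b =>
  if start ≤ b * rep ∧ b * rep ≤ stop then
    (if 2 * d = L then PySem.Set.add st.1 (b * rep) else st.1, PySem.Set.add st.2 (b * rep))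
  else st

def pvF2 (start stop L : Int) : pvSt → Int → pvSt := fun st d =>
  if PySem.Int.mod L d = 0 then
    (PySem.List.pyRange (10 ^ (d.toNat - 1)) (10 ^ d.toNat) 1).foldl
      (pvF3 start stop L d (repI L d)) st
  else st

def pvF1 (start stop : Int) : pvSt → Int → pvSt := fun st L =>
  (PySem.List.pyRange 1 (PySem.Int.floordiv L 2 + 1) 1).foldl (pvF2 start stop L) st

def pvB1 (start stop : Int) : pvSt :=
  (PySem.List.pyRange 2 (maxLenI stop + 1) 1).foldl (pvF1 start stop)
    ((PySem.Set.empty : PySem.Set Int), (PySem.Set.empty : PySem.Set Int))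

lemma B_eq (start stop : Int) :
    solve_range_alt start stop = ((pvB1 start stop).1.sum, (pvB1 start stop).2.sum) := rfl

-- membership through the three fold levels
lemma mem3_snd (start stop L d rep : Int) (bs : List Int) (st : pvSt) (x : Int) :
    x ∈ ((bs.foldl (pvF3 start stop L d rep) st)).2
      ↔ x ∈ st.2 ∨ ∃ b ∈ bs, x = b * rep ∧ start ≤ x ∧ x ≤ stop := by
  refine foldl_mem_acc (pvF3 start stop L d rep) (fun st => st.2)
    (fun b x => x = b * rep ∧ start ≤ x ∧ x ≤ stop) ?_ bs st x
  intro st b x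
  unfold pvF3
  split_ifs with h1 h2
  · show x ∈ PySem.Set.add st.2 (b * rep) ↔ _
    rw [PySem.Set.mem_add]
    constructor
    · rintro (h | rfl)
      · exact Or.inl h
      · exact Or.inr ⟨rfl, h1⟩
    · rintro (h | ⟨rfl, -⟩)
      · exact Or.inl h
      · exact Or.inr rfl
  · show x ∈ PySem.Set.add st.2 (b * rep) ↔ _
    rw [PySem.Set.mem_add]
    constructor
    · rintro (h | rfl)
      · exact Or.inl h
      · exact Or.inr ⟨rfl, h1⟩
    · rintro (h | ⟨rfl, -⟩)
      · exact Or.inl h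
      · exact Or.inr rfl
  · constructor
    · exact Or.inl
    · rintro (h | ⟨rfl, hr⟩)
      · exact h
      · exact absurd hr h1

lemma mem3_fst (start stop L d rep : Int) (bs : List Int) (st : pvSt) (x : Int) :
    x ∈ ((bs.foldl (pvF3 start stop L d rep) st)).1
      ↔ x ∈ st.1 ∨ (2 * d = L ∧ ∃ b ∈ bs, x = b * rep ∧ start ≤ x ∧ x ≤ stop) := by
  rw [foldl_mem_acc (pvF3 start stop L d rep) (fun st => st.1)
    (fun b x => 2 * d = L ∧ (x = b * rep ∧ start ≤ x ∧ x ≤ stop)) ?_ bs st x]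
  · constructor
    · rintro (h | ⟨b, hb, hdl, h⟩)
      · exact Or.inl h
      · exact Or.inr ⟨hdl, b, hb, h⟩
    · rintro (h | ⟨hdl, b, hb, h⟩)
      · exact Or.inl h
      · exact Or.inr ⟨b, hb, hdl, h⟩
  · intro st b x
    unfold pvF3
    split_ifs with h1 h2
    · show x ∈ PySem.Set.add st.1 (b * rep) ↔ _
      rw [PySem.Set.mem_add]
      constructor
      · rintro (h | rfl)
        · exact Or.inl h
        · exact Or.inr ⟨h2, rfl, h1⟩
      · rintro (h | ⟨-, rfl, -⟩)
        · exact Or.inl h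
        · exact Or.inr rfl
    · show x ∈ st.1 ↔ _
      constructor
      · exact Or.inl
      · rintro (h | ⟨hdl, -, -⟩)
        · exact h
        · exact absurd hdl h2
    · constructor
      · exact Or.inl
      · rintro (h | ⟨-, rfl, hr⟩)
        · exact h
        · exact absurd hr h1

lemma mem2_snd (start stop L : Int) (ds : List Int) (st : pvSt) (x : Int) :
    x ∈ ((ds.foldl (pvF2 start stop L) st)).2
      ↔ x ∈ st.2 ∨ ∃ d ∈ ds, PySem.Int.mod L d = 0 ∧
          ∃ b ∈ PySem.List.pyRange (10 ^ (d.toNat - 1)) (10 ^ d.toNat) 1,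
            x = b * repI L d ∧ start ≤ x ∧ x ≤ stop := by
  refine foldl_mem_acc (pvF2 start stop L) (fun st => st.2)
    (fun d x => PySem.Int.mod L d = 0 ∧
        ∃ b ∈ PySem.List.pyRange (10 ^ (d.toNat - 1)) (10 ^ d.toNat) 1,
          x = b * repI L d ∧ start ≤ x ∧ x ≤ stop) ?_ ds st x
  intro st d x
  unfold pvF2
  split_ifs with h1
  · rw [mem3_snd]
    constructor
    · rintro (h | hb)
      · exact Or.inl h
      · exact Or.inr ⟨h1, hb⟩
    · rintro (h | ⟨-, hb⟩)
      · exact Or.inl h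
      · exact Or.inr hb
  · constructor
    · exact Or.inl
    · rintro (h | ⟨hm, -⟩)
      · exact h
      · exact absurd hm h1

lemma mem2_fst (start stop L : Int) (ds : List Int) (st : pvSt) (x : Int) :
    x ∈ ((ds.foldl (pvF2 start stop L) st)).1
      ↔ x ∈ st.1 ∨ ∃ d ∈ ds, PySem.Int.mod L d = 0 ∧ 2 * d = L ∧
          ∃ b ∈ PySem.List.pyRange (10 ^ (d.toNat - 1)) (10 ^ d.toNat) 1,
            x = b * repI L d ∧ start ≤ x ∧ x ≤ stop := by
  refine foldl_mem_acc (pvF2 start stop L) (fun st => st.1)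
    (fun d x => PySem.Int.mod L d = 0 ∧ 2 * d = L ∧
        ∃ b ∈ PySem.List.pyRange (10 ^ (d.toNat - 1)) (10 ^ d.toNat) 1,
          x = b * repI L d ∧ start ≤ x ∧ x ≤ stop) ?_ ds st x
  intro st d x
  unfold pvF2
  split_ifs with h1
  · rw [mem3_fst]
    constructor
    · rintro (h | ⟨hdl, b, hb, hx⟩)
      · exact Or.inl h
      · exact Or.inr ⟨h1, hdl, b, hb, hx⟩
    · rintro (h | ⟨-, hdl, b, hb, hx⟩)
      · exact Or.inl h
      · exact Or.inr ⟨hdl, b, hb, hx⟩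
  · constructor
    · exact Or.inl
    · rintro (h | ⟨hm, -⟩)
      · exact h
      · exact absurd hm h1

lemma memB_snd (start stop x : Int) :
    x ∈ (pvB1 start stop).2
      ↔ ∃ L ∈ PySem.List.pyRange 2 (maxLenI stop + 1) 1,
          ∃ d ∈ PySem.List.pyRange 1 (PySem.Int.floordiv L 2 + 1) 1,
            PySem.Int.mod L d = 0 ∧
            ∃ b ∈ PySem.List.pyRange (10 ^ (d.toNat - 1)) (10 ^ d.toNat) 1,
              x = b * repI L d ∧ start ≤ x ∧ x ≤ stop := by
  unfold pvB1
  rw [foldl_mem_acc (pvF1 start stop) (fun st => st.2)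
    (fun L x => ∃ d ∈ PySem.List.pyRange 1 (PySem.Int.floordiv L 2 + 1) 1,
        PySem.Int.mod L d = 0 ∧
        ∃ b ∈ PySem.List.pyRange (10 ^ (d.toNat - 1)) (10 ^ d.toNat) 1,
          x = b * repI L d ∧ start ≤ x ∧ x ≤ stop) ?_ _ _ x]
  · show (x ∈ ([] : List Int) ∨ _) ↔ _
    simp only [List.not_mem_nil, false_or]
  · intro st L x
    unfold pvF1
    rw [mem2_snd]

lemma memB_fst (start stop x : Int) :
    x ∈ (pvB1 start stop).1
      ↔ ∃ L ∈ PySem.List.pyRange 2 (maxLenI stop + 1) 1,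
          ∃ d ∈ PySem.List.pyRange 1 (PySem.Int.floordiv L 2 + 1) 1,
            PySem.Int.mod L d = 0 ∧ 2 * d = L ∧
            ∃ b ∈ PySem.List.pyRange (10 ^ (d.toNat - 1)) (10 ^ d.toNat) 1,
              x = b * repI L d ∧ start ≤ x ∧ x ≤ stop := by
  unfold pvB1
  rw [foldl_mem_acc (pvF1 start stop) (fun st => st.1)
    (fun L x => ∃ d ∈ PySem.List.pyRange 1 (PySem.Int.floordiv L 2 + 1) 1,
        PySem.Int.mod L d = 0 ∧ 2 * d = L ∧
        ∃ b ∈ PySem.List.pyRange (10 ^ (d.toNat - 1)) (10 ^ d.toNat) 1,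
          x = b * repI L d ∧ start ≤ x ∧ x ≤ stop) ?_ _ _ x]
  · show (x ∈ ([] : List Int) ∨ _) ↔ _
    simp only [List.not_mem_nil, false_or]
  · intro st L x
    unfold pvF1
    rw [mem2_fst]

lemma nodupB (start stop : Int) :
    (pvB1 start stop).1.Nodup ∧ (pvB1 start stop).2.Nodup := by
  have h3 : ∀ (L d rep : Int) (bs : List Int) (st : pvSt),
      st.1.Nodup → st.2.Nodup →
      ((bs.foldl (pvF3 start stop L d rep) st)).1.Nodup ∧
      ((bs.foldl (pvF3 start stop L d rep) st)).2.Nodup := by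
    intro L d rep bs
    induction bs with
    | nil => intro st h1 h2; exact ⟨h1, h2⟩
    | cons b bs ih =>
      intro st h1 h2
      rw [List.foldl_cons]
      apply ih
      · unfold pvF3
        split_ifs
        · exact PySem.Set.nodup_add _ _ h1
        · exact h1
        · exact h1
      · unfold pvF3
        split_ifs
        · exact PySem.Set.nodup_add _ _ h2
        · exact PySem.Set.nodup_add _ _ h2
        · exact h2
  have h2 : ∀ (L : Int) (ds : List Int) (st : pvSt),
      st.1.Nodup → st.2.Nodup →
      ((ds.foldl (pvF2 start stop L) st)).1.Nodup ∧
      ((ds.foldl (pvF2 start stop L) st)).2.Nodup := by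
    intro L ds
    induction ds with
    | nil => intro st ha hb; exact ⟨ha, hb⟩
    | cons d ds ih =>
      intro st ha hb
      rw [List.foldl_cons]
      apply ih
      · unfold pvF2
        split_ifs
        · exact (h3 L d (repI L d) _ st ha hb).1
        · exact ha
      · unfold pvF2
        split_ifs
        · exact (h3 L d (repI L d) _ st ha hb).2
        · exact hb
  have h1 : ∀ (Ls : List Int) (st : pvSt),
      st.1.Nodup → st.2.Nodup →
      ((Ls.foldl (pvF1 start stop) st)).1.Nodup ∧
      ((Ls.foldl (pvF1 start stop) st)).2.Nodup := by
    intro Ls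
    induction Ls with
    | nil => intro st ha hb; exact ⟨ha, hb⟩
    | cons L Ls ih =>
      intro st ha hb
      rw [List.foldl_cons]
      apply ih
      · exact (h2 L _ st ha hb).1
      · exact (h2 L _ st ha hb).2
  exact h1 _ _ List.nodup_nil List.nodup_nil

lemma repI_eq (LN dN : Nat) (hd : 1 ≤ dN) (hdvd : dN ∣ LN) :
    repI (LN : Int) (dN : Int) = ((repu dN (LN / dN) : Nat) : Int) := by
  unfold repI
  rw [Int.toNat_natCast, Int.toNat_natCast]
  have h10L : 1 ≤ 10 ^ LN := Nat.one_le_pow _ _ (by omega)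
  have h10d : (10:Nat) ≤ 10 ^ dN := by
    calc (10:Nat) = 10 ^ 1 := (pow_one 10).symm
    _ ≤ 10 ^ dN := Nat.pow_le_pow_right (by omega) hd
  have hcL : ((10 ^ LN - 1 : Nat) : Int) = (10:Int) ^ LN - 1 := by
    rw [Nat.cast_sub h10L]
    push_cast
    ring
  have hcd : ((10 ^ dN - 1 : Nat) : Int) = (10:Int) ^ dN - 1 := by
    rw [Nat.cast_sub (by omega)]
    push_cast
    ring
  rw [← hcL, ← hcd, PySem.Int.floordiv_natCast]
  congr 1
  have hdr : dN * (LN / dN) = LN := Nat.mul_div_cancel' hdvd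
  have hsub := repu_le_sub dN (LN / dN)
  rw [hdr] at hsub
  rw [← hsub]
  exact Nat.mul_div_cancel_left _ (by omega)

lemma band_to_bounds (d r b : Nat) (hd : 1 ≤ d) (hr : 1 ≤ r)
    (hb1 : 10 ^ (d - 1) ≤ b) (hb2 : b < 10 ^ d) :
    10 ^ (d * r - 1) ≤ b * repu d r ∧ b * repu d r < 10 ^ (d * r) := by
  constructor
  · have h1 : 10 ^ (d - 1) * 10 ^ (d * (r - 1)) ≤ b * repu d r :=
      Nat.mul_le_mul hb1 (repu_ge d hr)
    rw [← pow_add] at h1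
    have he : d - 1 + d * (r - 1) = d * r - 1 := by
      obtain ⟨s, hs⟩ : ∃ s, r = s + 1 := ⟨r - 1, by omega⟩
      rw [hs]
      have e1 : d * (s + 1) = d * s + d := by ring
      simp only [Nat.add_sub_cancel]
      omega
    rw [he] at h1
    exact h1
  · have h1 : b * repu d r ≤ (10 ^ d - 1) * repu d r := Nat.mul_le_mul_right _ (by omega)
    rw [repu_le_sub] at h1
    have : 1 ≤ 10 ^ (d * r) := Nat.one_le_pow _ _ (by omega)
    omega

lemma band_of_dvd (m d r b : Nat) (hm : 1 ≤ m) (hd : 1 ≤ d) (hr : 1 ≤ r)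
    (hm1 : 10 ^ (d * r - 1) ≤ m) (hm2 : m < 10 ^ (d * r)) (hb : m = repu d r * b) :
    10 ^ (d - 1) ≤ b ∧ b < 10 ^ d := by
  have hrepos : 1 ≤ repu d r := repu_pos d hr
  have hbpos : 1 ≤ b := by
    rcases Nat.eq_zero_or_pos b with rfl | h
    · omega
    · exact h
  constructor
  · by_contra hc
    rw [not_le] at hc
    have hkey : repu d r * (10 ^ (d - 1) - 1) < 10 ^ (d * r - 1) := by
      apply band_lower hrepos (Nat.one_le_pow _ _ (by omega)) (Nat.one_le_pow _ _ (by omega))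
      have e1 : 10 * 10 ^ (d - 1) = 10 ^ d := by
        rw [Nat.mul_comm, ← pow_succ]
        congr 1
        omega
      have e2 : 10 * 10 ^ (d * r - 1) = 10 ^ (d * r) := by
        rw [Nat.mul_comm, ← pow_succ]
        congr 1
        have : 1 ≤ d * r := by
          rcases Nat.eq_zero_or_pos (d * r) with h | h
          · rcases Nat.mul_eq_zero.mp h with h' | h' <;> omega
          · exact h
        omega
      rw [e1, e2, repu_le_sub]
    have h1 : repu d r * b ≤ repu d r * (10 ^ (d - 1) - 1) :=
      Nat.mul_le_mul_left _ (by omega)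
    omega
  · by_contra hc
    rw [not_lt] at hc
    have h1 : repu d r * 10 ^ d ≤ repu d r * b := Nat.mul_le_mul_left _ hc
    have h2 : 10 ^ (d * (r - 1)) * 10 ^ d ≤ repu d r * 10 ^ d :=
      Nat.mul_le_mul_right _ (repu_ge d hr)
    rw [← pow_add] at h2
    have he : d * (r - 1) + d = d * r := by
      obtain ⟨s, hs⟩ : ∃ s, r = s + 1 := ⟨r - 1, by omega⟩
      rw [hs]
      have e1 : d * (s + 1) = d * s + d := by ring
      simp only [Nat.add_sub_cancel]
      omega
    rw [he] at h2
    omega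

lemma gen_iff_pp (start stop x : Int) :
    (∃ L ∈ PySem.List.pyRange 2 (maxLenI stop + 1) 1,
      ∃ d ∈ PySem.List.pyRange 1 (PySem.Int.floordiv L 2 + 1) 1,
        PySem.Int.mod L d = 0 ∧
        ∃ b ∈ PySem.List.pyRange (10 ^ (d.toNat - 1)) (10 ^ d.toNat) 1,
          x = b * repI L d ∧ start ≤ x ∧ x ≤ stop)
    ↔ (start ≤ x ∧ x ≤ stop ∧ ppB x = true) := by
  constructor
  · rintro ⟨L, hLmem, d, hdmem, hmod, b, hbmem, hx, hs1, hs2⟩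
    rw [PySem.List.mem_pyRange_one] at hLmem hdmem hbmem
    obtain ⟨LN, rfl⟩ : ∃ n : Nat, L = (n : Int) := ⟨L.toNat, by omega⟩
    obtain ⟨dN, rfl⟩ : ∃ n : Nat, d = (n : Int) := ⟨d.toNat, by omega⟩
    have hL2 : 2 ≤ LN := by exact_mod_cast hLmem.1
    have hd1 : 1 ≤ dN := by exact_mod_cast hdmem.1
    have hdle : dN ≤ LN / 2 := by
      rw [fd2_natCast] at hdmem
      have h := hdmem.2
      have : (dN : Int) ≤ ((LN / 2 : Nat) : Int) := by omega
      exact_mod_cast this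
    have hdvd : dN ∣ LN := by
      have h := (PySem.Int.mod_eq_zero_iff_dvd _ _).mp hmod
      exact_mod_cast h
    simp only [Int.toNat_natCast] at hbmem
    have hb0 : 0 ≤ b := by
      have h1 : (0:Int) ≤ (10:Int) ^ (dN - 1) := by positivity
      omega
    obtain ⟨bN, rfl⟩ : ∃ n : Nat, b = (n : Int) := ⟨b.toNat, by omega⟩
    have hbl : 10 ^ (dN - 1) ≤ bN := by
      have h := hbmem.1
      have : ((10 ^ (dN - 1) : Nat) : Int) ≤ (bN : Int) := by push_cast; omega
      exact_mod_cast this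
    have hbu : bN < 10 ^ dN := by
      have h := hbmem.2
      have : (bN : Int) < ((10 ^ dN : Nat) : Int) := by push_cast; omega
      exact_mod_cast this
    have hdL : dN ≤ LN := by omega
    have hr1 : 1 ≤ LN / dN := by
      rw [Nat.le_div_iff_mul_le (by omega)]
      omega
    have hdr : dN * (LN / dN) = LN := Nat.mul_div_cancel' hdvd
    have hxval : x = ((bN * repu dN (LN / dN) : Nat) : Int) := by
      rw [hx, repI_eq LN dN hd1 hdvd]
      push_cast
      ring
    have hbounds := band_to_bounds dN (LN / dN) bN hd1 hr1 hbl hbu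
    rw [hdr] at hbounds
    have hval1 : 1 ≤ bN * repu dN (LN / dN) := by
      have : 1 ≤ 10 ^ (LN - 1) := Nat.one_le_pow _ _ (by omega)
      omega
    have hxpos : 0 < x := by
      rw [hxval]
      exact_mod_cast hval1
    have hmN : x.toNat = bN * repu dN (LN / dN) := by
      rw [hxval]
      exact Int.toNat_natCast _
    have hlen : (decChars x.toNat).length = LN := by
      rw [decChars_len_eq_iff (by omega) (by omega)]
      rw [hmN]
      exact hbounds
    refine ⟨hs1, hs2, ?_⟩
    unfold ppB
    rw [Bool.and_eq_true, decide_eq_true_eq, List.any_eq_true]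
    refine ⟨hxpos, dN, List.mem_range.mpr (by rw [hlen]; omega), ?_⟩
    rw [Bool.and_eq_true, Bool.and_eq_true, decide_eq_true_eq, decide_eq_true_eq,
      decide_eq_true_eq, hlen]
    refine ⟨⟨hd1, hdvd⟩, ?_⟩
    rw [hmN]
    exact Dvd.intro_left _ rfl
  · rintro ⟨hs1, hs2, hpp⟩
    unfold ppB at hpp
    rw [Bool.and_eq_true, decide_eq_true_eq, List.any_eq_true] at hpp
    obtain ⟨hxpos, dN, hdr, hcond⟩ := hpp
    rw [Bool.and_eq_true, Bool.and_eq_true, decide_eq_true_eq, decide_eq_true_eq,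
      decide_eq_true_eq] at hcond
    obtain ⟨⟨hd1, hdvd⟩, hdvd2⟩ := hcond
    have hm1 : 1 ≤ x.toNat := by omega
    have hdle : dN ≤ (decChars x.toNat).length / 2 := by
      have := List.mem_range.mp hdr
      omega
    have hL2 : 2 ≤ (decChars x.toNat).length := by omega
    obtain ⟨hxb1, hxb2⟩ := decChars_bounds hm1
    obtain ⟨bN, hb⟩ := hdvd2
    have hdL : dN ≤ (decChars x.toNat).length := by omega
    have hr1 : 1 ≤ (decChars x.toNat).length / dN := by
      rw [Nat.le_div_iff_mul_le (by omega)]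
      omega
    have hdrr : dN * ((decChars x.toNat).length / dN) = (decChars x.toNat).length :=
      Nat.mul_div_cancel' hdvd
    have hband := band_of_dvd x.toNat dN ((decChars x.toNat).length / dN) bN hm1 hd1 hr1
      (by rw [hdrr]; exact hxb1) (by rw [hdrr]; exact hxb2) hb
    have h10 : 10 ≤ x.toNat := by
      have h1 : (10:Nat) ^ 1 ≤ 10 ^ ((decChars x.toNat).length - 1) :=
        Nat.pow_le_pow_right (by omega) (by omega)
      rw [pow_one] at h1
      omega
    have hstop : 0 < stop := by omega
    have hml : maxLenI stop = (((decChars stop.toNat).length : Nat) : Int) := by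
      unfold maxLenI
      rw [if_pos hstop, toChars_of_nonneg hstop.le]
    have hstopN : 1 ≤ stop.toNat := by omega
    have hmle : x.toNat ≤ stop.toNat := by omega
    have hsb := decChars_bounds hstopN
    have hLle : (decChars x.toNat).length ≤ (decChars stop.toNat).length := by
      have h1 : (10:Nat) ^ ((decChars x.toNat).length - 1)
          < 10 ^ ((decChars stop.toNat).length) :=
        lt_of_le_of_lt (le_trans hxb1 hmle) hsb.2
      rw [Nat.pow_lt_pow_iff_right (by omega)] at h1
      omega
    refine ⟨((decChars x.toNat).length : Int), ?_, (dN : Int), ?_, ?_, (bN : Int), ?_, ?_, hs1, hs2⟩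
    · rw [PySem.List.mem_pyRange_one, hml]
      constructor
      · exact_mod_cast hL2
      · have : ((decChars x.toNat).length : Int) ≤ ((decChars stop.toNat).length : Int) := by
          exact_mod_cast hLle
        omega
    · rw [PySem.List.mem_pyRange_one, fd2_natCast]
      constructor
      · exact_mod_cast hd1
      · have : (dN : Int) ≤ (((decChars x.toNat).length / 2 : Nat) : Int) := by
          exact_mod_cast hdle
        omega
    · rw [PySem.Int.mod_eq_zero_iff_dvd]
      exact_mod_cast hdvd
    · rw [PySem.List.mem_pyRange_one]
      simp only [Int.toNat_natCast]
      constructor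
      · have : ((10 ^ (dN - 1) : Nat) : Int) ≤ (bN : Int) := by exact_mod_cast hband.1
        push_cast at this
        omega
      · have : (bN : Int) < ((10 ^ dN : Nat) : Int) := by exact_mod_cast hband.2
        push_cast at this
        omega
    · rw [repI_eq ((decChars x.toNat).length) dN hd1 hdvd]
      have hxx : x = ((x.toNat : Nat) : Int) := (Int.toNat_of_nonneg hxpos.le).symm
      have hcast : ((x.toNat : Nat) : Int)
          = ((repu dN ((decChars x.toNat).length / dN) * bN : Nat) : Int) := by
        exact_mod_cast congrArg (fun n : Nat => (n : Int)) hb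
      conv_lhs => rw [hxx, hcast]
      push_cast
      ring

lemma gen_iff_ph (start stop x : Int) :
    (∃ L ∈ PySem.List.pyRange 2 (maxLenI stop + 1) 1,
      ∃ d ∈ PySem.List.pyRange 1 (PySem.Int.floordiv L 2 + 1) 1,
        PySem.Int.mod L d = 0 ∧ 2 * d = L ∧
        ∃ b ∈ PySem.List.pyRange (10 ^ (d.toNat - 1)) (10 ^ d.toNat) 1,
          x = b * repI L d ∧ start ≤ x ∧ x ≤ stop)
    ↔ (start ≤ x ∧ x ≤ stop ∧ phB x = true) := by
  constructor
  · rintro ⟨L, hLmem, d, hdmem, hmod, h2d, b, hbmem, hx, hs1, hs2⟩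
    rw [PySem.List.mem_pyRange_one] at hLmem hdmem hbmem
    obtain ⟨LN, rfl⟩ : ∃ n : Nat, L = (n : Int) := ⟨L.toNat, by omega⟩
    obtain ⟨dN, rfl⟩ : ∃ n : Nat, d = (n : Int) := ⟨d.toNat, by omega⟩
    have hL2 : 2 ≤ LN := by exact_mod_cast hLmem.1
    have hd1 : 1 ≤ dN := by exact_mod_cast hdmem.1
    have h2dN : 2 * dN = LN := by exact_mod_cast h2d
    have hdvd : dN ∣ LN := ⟨2, by omega⟩
    simp only [Int.toNat_natCast] at hbmem
    have hb0 : 0 ≤ b := by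
      have h1 : (0:Int) ≤ (10:Int) ^ (dN - 1) := by positivity
      omega
    obtain ⟨bN, rfl⟩ : ∃ n : Nat, b = (n : Int) := ⟨b.toNat, by omega⟩
    have hbl : 10 ^ (dN - 1) ≤ bN := by
      have h := hbmem.1
      have : ((10 ^ (dN - 1) : Nat) : Int) ≤ (bN : Int) := by push_cast; omega
      exact_mod_cast this
    have hbu : bN < 10 ^ dN := by
      have h := hbmem.2
      have : (bN : Int) < ((10 ^ dN : Nat) : Int) := by push_cast; omega
      exact_mod_cast this
    have hq : LN / dN = 2 := Nat.div_eq_of_eq_mul_left (by omega) (by omega)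
    have hdr : dN * (LN / dN) = LN := by rw [hq]; omega
    have hxval : x = ((bN * repu dN (LN / dN) : Nat) : Int) := by
      rw [hx, repI_eq LN dN hd1 hdvd]
      push_cast
      ring
    have hbounds := band_to_bounds dN (LN / dN) bN hd1 (by omega) hbl hbu
    rw [hdr] at hbounds
    have hval1 : 1 ≤ bN * repu dN (LN / dN) := by
      have : 1 ≤ 10 ^ (LN - 1) := Nat.one_le_pow _ _ (by omega)
      omega
    have hxpos : 0 < x := by
      rw [hxval]
      exact_mod_cast hval1
    have hmN : x.toNat = bN * repu dN (LN / dN) := by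
      rw [hxval]
      exact Int.toNat_natCast _
    have hlen : (decChars x.toNat).length = LN := by
      rw [decChars_len_eq_iff (by omega) (by omega)]
      rw [hmN]
      exact hbounds
    refine ⟨hs1, hs2, ?_⟩
    unfold phB
    rw [Bool.and_eq_true, Bool.and_eq_true, decide_eq_true_eq, decide_eq_true_eq,
      decide_eq_true_eq, hlen]
    refine ⟨⟨hxpos, ⟨dN, by omega⟩⟩, ?_⟩
    have hd2 : LN / 2 = dN := by omega
    rw [hd2, hmN, ← hq]
    exact Dvd.intro_left _ rfl
  · rintro ⟨hs1, hs2, hpp⟩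
    unfold phB at hpp
    rw [Bool.and_eq_true, Bool.and_eq_true, decide_eq_true_eq, decide_eq_true_eq,
      decide_eq_true_eq] at hpp
    obtain ⟨⟨hxpos, hdvd2⟩, hrep⟩ := hpp
    have hm1 : 1 ≤ x.toNat := by omega
    have hL1 : 1 ≤ (decChars x.toNat).length := decChars_len_pos _
    obtain ⟨k, hk⟩ := hdvd2
    have hL2 : 2 ≤ (decChars x.toNat).length := by omega
    have hd1 : 1 ≤ (decChars x.toNat).length / 2 := by omega
    have hdvd : (decChars x.toNat).length / 2 ∣ (decChars x.toNat).length := ⟨2, by omega⟩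
    have hq : (decChars x.toNat).length / ((decChars x.toNat).length / 2) = 2 :=
      Nat.div_eq_of_eq_mul_left (by omega) (by omega)
    obtain ⟨hxb1, hxb2⟩ := decChars_bounds hm1
    obtain ⟨bN, hb⟩ := hrep
    have hdrr : ((decChars x.toNat).length / 2)
        * ((decChars x.toNat).length / ((decChars x.toNat).length / 2))
        = (decChars x.toNat).length := by rw [hq]; omega
    have hband := band_of_dvd x.toNat ((decChars x.toNat).length / 2) 2 bN hm1 hd1 (by omega)
      (by rw [show (decChars x.toNat).length / 2 * 2 = (decChars x.toNat).length by omega]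
          exact hxb1)
      (by rw [show (decChars x.toNat).length / 2 * 2 = (decChars x.toNat).length by omega]
          exact hxb2) hb
    have h10 : 10 ≤ x.toNat := by
      have h1 : (10:Nat) ^ 1 ≤ 10 ^ ((decChars x.toNat).length - 1) :=
        Nat.pow_le_pow_right (by omega) (by omega)
      rw [pow_one] at h1
      omega
    have hstop : 0 < stop := by omega
    have hml : maxLenI stop = (((decChars stop.toNat).length : Nat) : Int) := by
      unfold maxLenI
      rw [if_pos hstop, toChars_of_nonneg hstop.le]
    have hstopN : 1 ≤ stop.toNat := by omega
    have hmle : x.toNat ≤ stop.toNat := by omega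
    have hsb := decChars_bounds hstopN
    have hLle : (decChars x.toNat).length ≤ (decChars stop.toNat).length := by
      have h1 : (10:Nat) ^ ((decChars x.toNat).length - 1)
          < 10 ^ ((decChars stop.toNat).length) :=
        lt_of_le_of_lt (le_trans hxb1 hmle) hsb.2
      rw [Nat.pow_lt_pow_iff_right (by omega)] at h1
      omega
    refine ⟨((decChars x.toNat).length : Int), ?_, (((decChars x.toNat).length / 2 : Nat)) , ?_, ?_, ?_,
      (bN : Int), ?_, ?_, hs1, hs2⟩
    · rw [PySem.List.mem_pyRange_one, hml]
      constructor
      · exact_mod_cast hL2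
      · have : ((decChars x.toNat).length : Int) ≤ ((decChars stop.toNat).length : Int) := by
          exact_mod_cast hLle
        omega
    · rw [PySem.List.mem_pyRange_one, fd2_natCast]
      constructor
      · exact_mod_cast hd1
      · omega
    · rw [PySem.Int.mod_eq_zero_iff_dvd]
      exact_mod_cast hdvd
    · push_cast
      omega
    · rw [PySem.List.mem_pyRange_one]
      simp only [Int.toNat_natCast]
      constructor
      · have : ((10 ^ ((decChars x.toNat).length / 2 - 1) : Nat) : Int) ≤ (bN : Int) := by
          exact_mod_cast hband.1
        push_cast at this
        omega
      · have : (bN : Int) < ((10 ^ ((decChars x.toNat).length / 2) : Nat) : Int) := by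
          exact_mod_cast hband.2
        push_cast at this
        omega
    · rw [repI_eq ((decChars x.toNat).length) ((decChars x.toNat).length / 2) hd1 hdvd]
      have hxx : x = ((x.toNat : Nat) : Int) := (Int.toNat_of_nonneg hxpos.le).symm
      have hcast : ((x.toNat : Nat) : Int)
          = ((repu ((decChars x.toNat).length / 2)
              ((decChars x.toNat).length / ((decChars x.toNat).length / 2)) * bN : Nat) : Int) := by
        rw [hq]
        exact_mod_cast congrArg (fun n : Nat => (n : Int)) hb
      conv_lhs => rw [hxx, hcast]
      push_cast
      ring

lemma pvMainEq : ∀ (start stop : Int),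
    solve_range start stop = solve_range_alt start stop := by
  intro start stop
  rw [A_eq, B_eq]
  obtain ⟨hnd1, hnd2⟩ := nodupB start stop
  have hperm1 : ((PySem.List.pyRange start (stop + 1) 1).filter phB).Perm (pvB1 start stop).1 := by
    rw [List.perm_ext_iff_of_nodup (List.Nodup.filter _ (PySem.List.nodup_pyRange_one _ _)) hnd1]
    intro a
    rw [List.mem_filter, PySem.List.mem_pyRange_one, memB_fst, gen_iff_ph]
    constructor
    · rintro ⟨⟨h1, h2⟩, hp⟩
      exact ⟨h1, by omega, hp⟩
    · rintro ⟨h1, h2, hp⟩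
      exact ⟨⟨h1, by omega⟩, hp⟩
  have hperm2 : ((PySem.List.pyRange start (stop + 1) 1).filter ppB).Perm (pvB1 start stop).2 := by
    rw [List.perm_ext_iff_of_nodup (List.Nodup.filter _ (PySem.List.nodup_pyRange_one _ _)) hnd2]
    intro a
    rw [List.mem_filter, PySem.List.mem_pyRange_one, memB_snd, gen_iff_pp]
    constructor
    · rintro ⟨⟨h1, h2⟩, hp⟩
      exact ⟨h1, by omega, hp⟩
    · rintro ⟨h1, h2, hp⟩
      exact ⟨⟨h1, by omega⟩, hp⟩
  exact Prod.ext hperm1.sum_eq hperm2.sum_eq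

-- ===== VERDICT (by name: the statement is the Claim_ definition above) =====
theorem solve_range_spec : Claim_equal_solve_range := by
  intro start stop _
  unfold Spec_solve_range
  exact pvMainEq start stop
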